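-- pv_equiv track=rewrite | github.com/flurinh/protos | src/protos/io/fasta_utils.py | validate_fasta_format
-- ===== SOURCE A (Python) =====
-- def validate_fasta_format(content):
--
--     """Validate that a string is in proper FASTA format."""
--
--     if not content.strip():
--
--         return False
--
--
--
--     lines = content.strip().split('\n')
--
--
--
--     # First line must start with >
--
--     if not lines[0].startswith('>'):
--
--         return False
--
--
--
--     current_header = None
--
--     current_sequence = ""
--
--
--
--     for line in lines:
--
--         if line.startswith('>'):
--
--             # If we already had a header, check that it had a sequence
--
--             if current_header is not None and not current_sequence:
--
--                 return False
--
--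
--
--             current_header = line[1:]
--
--             current_sequence = ""
--
--         else:
--
--             current_sequence += line.strip()
--
--
--
--     # Check the last sequence
--
--     if not current_sequence:
--
--         return False
--
--
--
--     return True
-- ===== SOURCE B (Python) =====
-- def validate_fasta_format(content):
--     """Validate that a string is in proper FASTA format."""
--     stripped = content.strip()
--     if not stripped.startswith('>'):
--         return False
--     records = stripped.split('\n>')
--     return all(''.join(part.strip() for part in rec.split('\n')[1:]) for rec in records)
-- ===== Notes on version B (the rewrite author's own statement) =====
-- stated objective: idiomatic
-- what changed: Replaces the stateful line-by-line scan with current_header/current_sequence accumulators and early returns by a parse-into-records pass (split the stripped content on '\n>' record boundaries) followed by an all() over records checking that each record's joined, per-line-stripped body is nonempty.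
import Mathlib
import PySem

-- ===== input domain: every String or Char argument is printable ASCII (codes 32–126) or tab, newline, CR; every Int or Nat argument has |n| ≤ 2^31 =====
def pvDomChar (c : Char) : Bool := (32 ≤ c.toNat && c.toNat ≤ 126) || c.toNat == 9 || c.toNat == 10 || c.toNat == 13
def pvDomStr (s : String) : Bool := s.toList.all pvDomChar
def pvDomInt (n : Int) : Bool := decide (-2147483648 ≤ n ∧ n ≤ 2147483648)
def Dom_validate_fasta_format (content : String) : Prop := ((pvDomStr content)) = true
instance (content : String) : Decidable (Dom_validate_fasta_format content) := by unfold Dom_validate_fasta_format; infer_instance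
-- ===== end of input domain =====

-- B replaces A's stateful line scan (header/sequence accumulators with early returns) by
-- splitting the stripped content into records on '\n>' boundaries and checking every record's
-- joined stripped body is nonempty (objective: idiomatic; same return value everywhere).

-- ===== PORT A =====
-- the for-loop over lines with state (current_header, current_sequence) and its early returns
def pvLoopA : Option (List Char) → List Char → List (List Char) → Bool
  | _, seq, [] => !seq.isEmpty
  | h, seq, l :: ls =>
    if PySem.Chars.startswith l ['>'] then
      if h.isSome && seq.isEmpty then false
      else pvLoopA (some (PySem.List.slice l (some 1) none)) [] ls
    else pvLoopA h (seq ++ PySem.Chars.strip l) ls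

def validate_fasta_format (content : String) : Bool :=
  let s := PySem.Chars.strip content.toList
  if s.isEmpty then false
  else
    let lines := PySem.Chars.splitOn s ['\n']
    -- lines[0]: `lines` is never empty, so the `.getD []` default is unreachable
    if !PySem.Chars.startswith ((PySem.List.pyGet? lines 0).getD []) ['>'] then false
    else pvLoopA none [] lines

-- ===== PORT B =====
def validate_fasta_format_alt (content : String) : Bool :=
  let s := PySem.Chars.strip content.toList
  if !PySem.Chars.startswith s ['>'] then false
  else
    (PySem.Chars.splitOn s ['\n', '>']).all fun r =>
      !(PySem.Chars.join []
          ((PySem.List.slice (PySem.Chars.splitOn r ['\n']) (some 1) none).map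
            PySem.Chars.strip)).isEmpty

-- ===== PRECONDITION & SPEC =====
def Spec_validate_fasta_format (content : String) (out : Bool) : Prop := out = validate_fasta_format_alt content
instance (content : String) (out : Bool) : Decidable (Spec_validate_fasta_format content out) := by unfold Spec_validate_fasta_format; infer_instance

-- ===== CLAIM (what is proved, stated in full; the proofs are below) =====
def Claim_equal_validate_fasta_format : Prop := ∀ (content : String), Dom_validate_fasta_format content → Spec_validate_fasta_format content (validate_fasta_format content)

-- ===== LEMMAS AND PROOFS =====

-- fuel-free model of PySem.Chars.splitOn.go for a nonempty separator c :: cs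
def pvSgo (c : Char) (cs : List Char) : List Char → List Char → List (List Char) → List (List Char)
  | [], cur, acc => (cur.reverse :: acc).reverse
  | a :: rest, cur, acc =>
    if (c :: cs).isPrefixOf (a :: rest) then
      pvSgo c cs ((a :: rest).drop (c :: cs).length) [] (cur.reverse :: acc)
    else pvSgo c cs rest (a :: cur) acc
termination_by l => l.length
decreasing_by
  · simp only [List.length_drop, List.length_cons]; omega
  · simp

theorem pvGo_eq (c : Char) (cs : List Char) :
    ∀ (fuel : Nat) (l cur : List Char) (acc : List (List Char)), l.length < fuel →
      PySem.Chars.splitOn.go (c :: cs) fuel l cur acc = pvSgo c cs l cur acc := by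
  intro fuel
  induction fuel with
  | zero => intro l cur acc h; omega
  | succ n ih =>
    intro l cur acc h
    match l with
    | [] => rw [PySem.Chars.splitOn.go.eq_def]; simp [pvSgo]
    | a :: rest =>
      rw [PySem.Chars.splitOn.go.eq_def]
      simp only [pvSgo]
      by_cases hp : (c :: cs).isPrefixOf (a :: rest)
      · simp only [hp, if_true]
        apply ih
        simp only [List.length_drop, List.length_cons] at *
        omega
      · simp only [hp, if_false, Bool.false_eq_true]
        apply ih
        simp at h ⊢; omega

theorem pvSplitOn_eq_sgo (c : Char) (cs s : List Char) :
    PySem.Chars.splitOn s (c :: cs) = pvSgo c cs s [] [] := by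
  show PySem.Chars.splitOn.go (c :: cs) (s.length + 1) s [] [] = _
  exact pvGo_eq c cs (s.length + 1) s [] [] (by omega)

-- scanning a newline-free piece just moves it into the current chunk
theorem pvSgo_scan (cs : List Char) :
    ∀ (p t cur : List Char) (acc : List (List Char)), '\n' ∉ p →
      pvSgo '\n' cs (p ++ t) cur acc = pvSgo '\n' cs t (p.reverse ++ cur) acc := by
  intro p
  induction p with
  | nil => intro t cur acc _; simp
  | cons a p' ih =>
    intro t cur acc hnp
    have ha : a ≠ '\n' := by intro h; exact hnp (by simp [h])
    have hnpre : ¬ ('\n' :: cs).isPrefixOf (a :: (p' ++ t)) := by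
      simp [List.isPrefixOf]; intro h; exact absurd h.symm ha
    rw [List.cons_append, pvSgo, if_neg hnpre, ih t (a :: cur) acc (fun h => hnp (by simp [h]))]
    simp

theorem pvSgo_acc (c : Char) (cs : List Char) :
    ∀ (n : Nat) (l cur : List Char) (acc : List (List Char)), l.length ≤ n →
      pvSgo c cs l cur acc = acc.reverse ++ pvSgo c cs l cur [] := by
  intro n
  induction n with
  | zero =>
    intro l cur acc h
    have : l = [] := List.eq_nil_of_length_eq_zero (Nat.le_zero.mp h)
    subst this; simp [pvSgo]
  | succ m ih =>
    intro l cur acc h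
    match l with
    | [] => simp [pvSgo]
    | a :: rest =>
      by_cases hp : (c :: cs).isPrefixOf (a :: rest)
      · rw [pvSgo, if_pos hp, pvSgo, if_pos hp]
        have hlen : ((a :: rest).drop (c :: cs).length).length ≤ m := by
          simp only [List.length_drop, List.length_cons] at *; omega
        rw [ih _ [] (cur.reverse :: acc) hlen, ih _ [] [cur.reverse] hlen]
        simp
      · rw [pvSgo, if_neg hp, pvSgo, if_neg hp]
        exact ih rest (a :: cur) acc (by simp at h ⊢; omega)

theorem pvSgo_acc' (c : Char) (cs : List Char) (l cur : List Char) (acc : List (List Char)) :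
    pvSgo c cs l cur acc = acc.reverse ++ pvSgo c cs l cur [] :=
  pvSgo_acc c cs l.length l cur acc (le_refl _)

theorem pvSgo_ne_nil (c : Char) (cs : List Char) :
    ∀ (n : Nat) (l cur : List Char) (acc : List (List Char)), l.length ≤ n →
      pvSgo c cs l cur acc ≠ [] := by
  intro n
  induction n with
  | zero =>
    intro l cur acc h
    have : l = [] := List.eq_nil_of_length_eq_zero (Nat.le_zero.mp h)
    subst this; simp [pvSgo]
  | succ m ih =>
    intro l cur acc h
    match l with
    | [] => simp [pvSgo]
    | a :: rest =>
      by_cases hp : (c :: cs).isPrefixOf (a :: rest)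
      · rw [pvSgo, if_pos hp]
        exact ih _ [] (cur.reverse :: acc) (by simp only [List.length_drop, List.length_cons] at *; omega)
      · rw [pvSgo, if_neg hp]
        exact ih rest (a :: cur) acc (by simp at h ⊢; omega)

-- every chunk produced by the '\n' splitter is newline-free
theorem pvSgo1_nl_free :
    ∀ (l cur : List Char) (acc : List (List Char)), '\n' ∉ cur → (∀ q ∈ acc, '\n' ∉ q) →
      ∀ q ∈ pvSgo '\n' [] l cur acc, '\n' ∉ q := by
  intro l
  induction l with
  | nil =>
    intro cur acc hc hacc q hq
    simp [pvSgo] at hq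
    rcases hq with hq | hq
    · exact hacc q hq
    · subst hq; simpa using hc
  | cons a rest ih =>
    intro cur acc hc hacc q hq
    by_cases hp : (['\n'] : List Char).isPrefixOf (a :: rest)
    · have ha : a = '\n' := by simp [List.isPrefixOf] at hp; exact hp.symm
      rw [pvSgo, if_pos hp] at hq
      simp only [List.length_cons, List.length_nil, List.drop_succ_cons, List.drop_zero] at hq
      have hacc' : ∀ q' ∈ (cur.reverse :: acc), '\n' ∉ q' := by
        intro q' hq'
        rcases List.mem_cons.mp hq' with hq' | hq'
        · subst hq'; simpa using hc
        · exact hacc q' hq'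
      exact ih [] (cur.reverse :: acc) (by simp) hacc' q hq
    · have ha : a ≠ '\n' := by
        simp [List.isPrefixOf] at hp; intro h; exact hp h.symm
      rw [pvSgo, if_neg hp] at hq
      have hc' : '\n' ∉ (a :: cur) := by
        intro h
        rcases List.mem_cons.mp h with h | h
        · exact ha h.symm
        · exact hc h
      exact ih (a :: cur) acc hc' hacc q hq

-- join of the chunks with '\n' restores the input
def pvI : List (List Char) → List Char
  | [] => []
  | [p] => p
  | p :: q :: t => p ++ '\n' :: pvI (q :: t)

theorem pvI_cons (p : List Char) (t : List (List Char)) (ht : t ≠ []) :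
    pvI (p :: t) = p ++ '\n' :: pvI t := by
  match t with
  | [] => exact absurd rfl ht
  | q :: t' => rfl

theorem pvI_sgo1 :
    ∀ (l cur : List Char), pvI (pvSgo '\n' [] l cur []) = cur.reverse ++ l := by
  intro l
  induction l with
  | nil => intro cur; simp [pvSgo, pvI]
  | cons a rest ih =>
    intro cur
    by_cases hp : (['\n'] : List Char).isPrefixOf (a :: rest)
    · have ha : a = '\n' := by simp [List.isPrefixOf] at hp; exact hp.symm
      rw [pvSgo, if_pos hp]
      simp only [List.length_cons, List.length_nil, List.drop_succ_cons, List.drop_zero]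
      rw [pvSgo_acc' '\n' [] rest [] [cur.reverse]]
      simp only [List.reverse_cons, List.reverse_nil, List.nil_append, List.singleton_append]
      rw [pvI_cons _ _ (pvSgo_ne_nil '\n' [] rest.length rest [] [] (le_refl _)), ih []]
      simp [ha]
    · have ha : a ≠ '\n' := by
        simp [List.isPrefixOf] at hp; intro h; exact hp h.symm
      rw [pvSgo, if_neg hp, ih (a :: cur)]
      simp

-- splitting a '\n'-join of newline-free pieces gives the pieces back
theorem pvSgo1_I :
    ∀ (ls : List (List Char)), ls ≠ [] → (∀ q ∈ ls, '\n' ∉ q) →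
      ∀ (cur : List Char) (acc : List (List Char)),
        pvSgo '\n' [] (pvI ls) cur acc =
          acc.reverse ++ (cur.reverse ++ ls.headI) :: ls.tail := by
  intro ls
  induction ls with
  | nil => intro h; exact absurd rfl h
  | cons p t ih =>
    intro _ hfree cur acc
    match t with
    | [] =>
      have h1 : pvI [p] = p := rfl
      have h2 := pvSgo_scan [] p [] cur acc (hfree p (by simp))
      simp only [List.append_nil] at h2
      rw [h1, h2]
      simp [pvSgo]
    | q :: t' =>
      rw [pvI_cons p (q :: t') (by simp),
        pvSgo_scan [] p ('\n' :: pvI (q :: t')) cur acc (hfree p (by simp))]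
      have hpre : (['\n'] : List Char).isPrefixOf ('\n' :: pvI (q :: t')) := by
        simp [List.isPrefixOf]
      rw [pvSgo, if_pos hpre]
      simp only [List.length_cons, List.length_nil, List.drop_succ_cons, List.drop_zero]
      rw [ih (by simp) (fun q' hq' => hfree q' (by simp [hq'])) [] ((p.reverse ++ cur).reverse :: acc)]
      simp

-- the '\n>' record splitter, modelled on the line list
def pvRecs : List Char → List (List Char) → List (List Char)
  | pref, [] => [pref]
  | pref, [p] => [pref ++ p]
  | pref, p :: q :: t =>
    if (['>'] : List Char).isPrefixOf q then (pref ++ p) :: pvRecs [] (q.drop 1 :: t)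
    else pvRecs (pref ++ p ++ ['\n']) (q :: t)
termination_by _ ls => ls.length
decreasing_by all_goals (simp only [List.length_cons]; omega)

theorem pvHdr_I (q : List Char) (t : List (List Char)) (hq : '\n' ∉ q) :
    (['>'] : List Char).isPrefixOf (pvI (q :: t)) = (['>'] : List Char).isPrefixOf q := by
  match q, t with
  | [], [] => rfl
  | [], q' :: t' => rw [pvI_cons _ _ (by simp)]; simp [List.isPrefixOf]
  | a :: q₀, [] => rfl
  | a :: q₀, q' :: t' => rw [pvI_cons _ _ (by simp)]; simp [List.isPrefixOf]

theorem pvSgo2_I :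
    ∀ (pref : List Char) (ls : List (List Char)), ls ≠ [] → (∀ q ∈ ls, '\n' ∉ q) →
      ∀ (acc : List (List Char)),
        pvSgo '\n' ['>'] (pvI ls) pref.reverse acc = acc.reverse ++ pvRecs pref ls := by
  intro pref ls
  induction pref, ls using pvRecs.induct with
  | case1 pref => intro h; exact absurd rfl h
  | case2 pref p =>
    intro _ hfree acc
    have h1 : pvI [p] = p := rfl
    have h2 := pvSgo_scan ['>'] p [] pref.reverse acc (hfree p (by simp))
    simp only [List.append_nil] at h2
    rw [h1, h2]
    simp [pvSgo, pvRecs]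
  | case3 pref p q t hq ih =>
    intro _ hfree acc
    rw [pvI_cons p (q :: t) (by simp),
      pvSgo_scan ['>'] p ('\n' :: pvI (q :: t)) pref.reverse acc (hfree p (by simp))]
    have hpre : (['\n', '>'] : List Char).isPrefixOf ('\n' :: pvI (q :: t)) := by
      have h3 : (['>'] : List Char).isPrefixOf (pvI (q :: t)) = true :=
        (pvHdr_I q t (hfree q (by simp))).trans hq
      simpa [List.isPrefixOf] using h3
    rw [pvSgo, if_pos hpre]
    have hqne : q ≠ [] := by intro h; rw [h] at hq; simp [List.isPrefixOf] at hq
    have hdrop : ('\n' :: pvI (q :: t)).drop (['\n', '>'] : List Char).length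
        = pvI (q.drop 1 :: t) := by
      match q, hqne with
      | a :: q₀, _ =>
        have ha : a = '>' := by simp [List.isPrefixOf] at hq; exact hq.symm
        match t with
        | [] => simp [pvI]
        | q' :: t'' =>
          rw [pvI_cons (a :: q₀) (q' :: t'') (by simp),
            pvI_cons (List.drop 1 (a :: q₀)) (q' :: t'') (by simp)]
          simp
    rw [hdrop]
    have hcur : (p.reverse ++ pref.reverse).reverse = pref ++ p := by simp
    rw [hcur]
    have hfree' : ∀ q' ∈ (List.drop 1 q :: t), '\n' ∉ q' := by
      intro q' hq'
      rcases List.mem_cons.mp hq' with hq' | hq'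
      · subst hq'; exact fun hm => hfree q (by simp) (List.mem_of_mem_drop hm)
      · exact hfree q' (by simp [hq'])
    have hrec := ih (by simp) hfree' ((pref ++ p) :: acc)
    simp only [List.reverse_nil] at hrec
    rw [hrec, pvRecs]
    simp [hq]
  | case4 pref p q t hq ih =>
    intro _ hfree acc
    rw [pvI_cons p (q :: t) (by simp),
      pvSgo_scan ['>'] p ('\n' :: pvI (q :: t)) pref.reverse acc (hfree p (by simp))]
    have h3 : (['>'] : List Char).isPrefixOf q = false := by
      cases hb : (['>'] : List Char).isPrefixOf q
      · rfl
      · exact absurd hb hq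
    have hnpre : ¬ (['\n', '>'] : List Char).isPrefixOf ('\n' :: pvI (q :: t)) = true := by
      have heq : (['\n', '>'] : List Char).isPrefixOf ('\n' :: pvI (q :: t))
          = (['>'] : List Char).isPrefixOf (pvI (q :: t)) := by simp [List.isPrefixOf]
      rw [heq, pvHdr_I q t (hfree q (by simp)), h3]
      simp
    rw [pvSgo, if_neg hnpre]
    have hcur : ('\n' :: (p.reverse ++ pref.reverse)) = (pref ++ p ++ ['\n']).reverse := by simp
    rw [hcur, ih (by simp) (fun q' hq' => hfree q' (by simp [hq'])) acc, pvRecs]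
    simp [h3]

-- grouping the lines into records (header line kept at the front of its block)
def pvBlk (cur : List (List Char)) : List (List Char) → List (List (List Char))
  | [] => [cur]
  | q :: t =>
    if (['>'] : List Char).isPrefixOf q then cur :: pvBlk [q.drop 1] t
    else pvBlk (cur ++ [q]) t

theorem pvI_append_singleton :
    ∀ (cur : List (List Char)) (p : List Char), cur ≠ [] →
      pvI (cur ++ [p]) = pvI cur ++ '\n' :: p := by
  intro cur
  induction cur with
  | nil => intro p h; exact absurd rfl h
  | cons c t ih =>
    intro p _
    match t with
    | [] => rfl
    | d :: t' =>
      rw [List.cons_append, pvI_cons c ((d :: t') ++ [p]) (by simp),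
        pvI_cons c (d :: t') (by simp), ih p (by simp)]
      simp

theorem pvRecs_eq_blk :
    ∀ (t : List (List Char)) (p : List Char) (cur : List (List Char)),
      pvRecs (if cur = [] then [] else pvI cur ++ ['\n']) (p :: t) =
        (pvBlk (cur ++ [p]) t).map pvI := by
  intro t
  induction t with
  | nil =>
    intro p cur
    rw [pvRecs, pvBlk]
    by_cases hc : cur = []
    · subst hc; simp [pvI]
    · rw [if_neg hc]
      simp [pvI_append_singleton cur p hc]
  | cons q t' ih =>
    intro p cur
    have hJp : (if cur = [] then [] else pvI cur ++ ['\n']) ++ p = pvI (cur ++ [p]) := by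
      by_cases hc : cur = []
      · subst hc; simp [pvI]
      · rw [if_neg hc, pvI_append_singleton cur p hc]; simp
    rw [pvRecs]
    by_cases hq : (['>'] : List Char).isPrefixOf q
    · rw [if_pos hq, pvBlk, if_pos hq]
      have h2 := ih (q.drop 1) []
      simp only [reduceIte, List.nil_append] at h2
      rw [h2, hJp]
      simp
    · rw [if_neg hq, pvBlk, if_neg hq]
      have hJ2 : (if cur = [] then [] else pvI cur ++ ['\n']) ++ p ++ ['\n'] =
          (if cur ++ [p] = [] then [] else pvI (cur ++ [p]) ++ ['\n']) := by
        rw [if_neg (show ¬(cur ++ [p] = []) by simp), ← hJp]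
      rw [hJ2, ih q (cur ++ [p])]

def pvChk (b : List (List Char)) : Bool := !((b.drop 1).map PySem.Chars.strip).flatten.isEmpty

theorem pvLoopA_blocks :
    ∀ (ls : List (List Char)) (h : List Char) (hl : List Char) (cur : List (List Char)),
      pvLoopA (some h) ((cur.map PySem.Chars.strip).flatten) ls =
        ((pvBlk (hl :: cur) ls).map pvChk).all id := by
  intro ls
  induction ls with
  | nil => intro h hl cur; simp [pvLoopA, pvBlk, pvChk]
  | cons q t ih =>
    intro h hl cur
    rw [pvLoopA, pvBlk]
    by_cases hq : (['>'] : List Char).isPrefixOf q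
    · rw [if_pos (show PySem.Chars.startswith q ['>'] = true from hq), if_pos hq]
      simp only [List.map_cons, List.all_cons, Option.isSome_some, Bool.true_and]
      by_cases hs : ((cur.map PySem.Chars.strip).flatten).isEmpty
      · rw [if_pos hs]
        have : pvChk (hl :: cur) = false := by simp [pvChk, hs]
        rw [this]
        simp
      · rw [if_neg hs]
        have h1 : pvChk (hl :: cur) = true := by simp [pvChk] at hs ⊢; exact hs
        have h2 := ih (PySem.List.slice q (some 1) none) (q.drop 1) []
        simp only [List.map_nil, List.flatten_nil] at h2
        rw [h2, h1]
        simp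
    · rw [if_neg (show ¬ PySem.Chars.startswith q ['>'] = true from hq), if_neg hq]
      have h2 := ih h hl (cur ++ [q])
      simp only [List.map_append, List.flatten_append, List.map_cons, List.map_nil,
        List.flatten_cons, List.flatten_nil, List.append_nil] at h2
      rw [h2]
      simp

theorem pvBlk_nl_free :
    ∀ (ls : List (List Char)) (cur : List (List Char)), cur ≠ [] →
      (∀ x ∈ cur, '\n' ∉ x) → (∀ x ∈ ls, '\n' ∉ x) →
      ∀ b ∈ pvBlk cur ls, b ≠ [] ∧ ∀ x ∈ b, '\n' ∉ x := by
  intro ls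
  induction ls with
  | nil =>
    intro cur hne hcur _ b hb
    simp [pvBlk] at hb
    subst hb
    exact ⟨hne, hcur⟩
  | cons w t ih =>
    intro cur hne hcur hls b hb
    rw [pvBlk] at hb
    by_cases hw : (['>'] : List Char).isPrefixOf w
    · rw [if_pos hw] at hb
      rcases List.mem_cons.mp hb with hb | hb
      · subst hb; exact ⟨hne, hcur⟩
      · refine ih [w.drop 1] (by simp) ?_ (fun x hx => hls x (List.mem_cons_of_mem _ hx)) b hb
        intro x hx
        rw [List.mem_singleton] at hx
        subst hx
        exact fun hm => hls w (by simp) (List.mem_of_mem_drop hm)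
    · rw [if_neg hw] at hb
      refine ih (cur ++ [w]) (by simp) ?_ (fun x hx => hls x (List.mem_cons_of_mem _ hx)) b hb
      intro x hx
      rcases List.mem_append.mp hx with hx | hx
      · exact hcur x hx
      · rw [List.mem_singleton] at hx
        rw [hx]
        exact hls w (by simp)

theorem pvFlatten_intersperse (parts : List (List Char)) :
    (List.intersperse [] parts).flatten = parts.flatten := by
  induction parts with
  | nil => rfl
  | cons p t ih =>
    cases t with
    | nil => rfl
    | cons q t' =>
      simp only [List.intersperse, List.flatten_cons, List.nil_append] at *
      rw [ih]

theorem pvJoin_nil (parts : List (List Char)) :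
    PySem.Chars.join [] parts = parts.flatten := by
  simp [PySem.Chars.join, List.intercalate, pvFlatten_intersperse]

theorem pvAll_congr {α : Type} (l : List α) (f g : α → Bool)
    (h : ∀ x ∈ l, f x = g x) : l.all f = l.all g := by
  induction l with
  | nil => rfl
  | cons a t ih =>
    simp only [List.all_cons]
    rw [h a (by simp), ih (fun x hx => h x (by simp [hx]))]

-- ===== VERDICT (by name: the statement is the Claim_ definition above) =====
theorem validate_fasta_format_spec : Claim_equal_validate_fasta_format := by
  unfold Claim_equal_validate_fasta_format
  intro content _
  unfold Spec_validate_fasta_format validate_fasta_format validate_fasta_format_alt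
  by_cases hemp : (PySem.Chars.strip content.toList).isEmpty
  · have hnil : PySem.Chars.strip content.toList = [] := by simpa using hemp
    simp [hnil, PySem.Chars.startswith]
  · simp only [hemp, if_false, Bool.false_eq_true]
    have hsgo1 : PySem.Chars.splitOn (PySem.Chars.strip content.toList) ['\n']
        = pvSgo '\n' [] (PySem.Chars.strip content.toList) [] [] :=
      pvSplitOn_eq_sgo '\n' [] _
    have hfree : ∀ q ∈ PySem.Chars.splitOn (PySem.Chars.strip content.toList) ['\n'], '\n' ∉ q := by
      rw [hsgo1]
      exact pvSgo1_nl_free _ [] [] (by simp) (by simp)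
    have hI : pvI (PySem.Chars.splitOn (PySem.Chars.strip content.toList) ['\n'])
        = PySem.Chars.strip content.toList := by
      rw [hsgo1, pvI_sgo1]
      simp
    have hne : PySem.Chars.splitOn (PySem.Chars.strip content.toList) ['\n'] ≠ [] := by
      rw [hsgo1]
      exact pvSgo_ne_nil '\n' [] _ _ [] [] (le_refl _)
    match hls : PySem.Chars.splitOn (PySem.Chars.strip content.toList) ['\n'], hne with
    | l0 :: rest, _ =>
      rw [hls] at hfree hI
      have hguard : PySem.Chars.startswith (PySem.Chars.strip content.toList) ['>']
          = PySem.Chars.startswith l0 ['>'] := by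
        show (['>'] : List Char).isPrefixOf _ = (['>'] : List Char).isPrefixOf l0
        rw [← hI]
        exact pvHdr_I l0 rest (hfree l0 (by simp))
      have hget : ((PySem.List.pyGet? (l0 :: rest) 0).getD []) = l0 := by
        simp [PySem.List.pyGet?, PySem.List.pyIdx?]
      rw [hget]
      by_cases hhd : PySem.Chars.startswith l0 ['>']
      · rw [if_neg (by rw [hhd]; simp), if_neg (by rw [hguard, hhd]; simp)]
        -- A side: one loop step consumes the first header line, then blocks
        rw [pvLoopA, if_pos hhd]
        simp only [Option.isSome_none, Bool.false_and, if_false, Bool.false_eq_true]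
        have hA := pvLoopA_blocks rest (PySem.List.slice l0 (some 1) none) l0 []
        simp only [List.map_nil, List.flatten_nil] at hA
        rw [hA]
        -- B side: records are the blocks joined back with '\n'
        have hsgo2 : PySem.Chars.splitOn (PySem.Chars.strip content.toList) ['\n', '>']
            = pvRecs [] (l0 :: rest) := by
          rw [pvSplitOn_eq_sgo '\n' ['>'] _, ← hI]
          have h := pvSgo2_I [] (l0 :: rest) (by simp) hfree []
          simp only [List.reverse_nil, List.nil_append] at h
          exact h
        have hrecs : pvRecs [] (l0 :: rest) = (pvBlk [l0] rest).map pvI := by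
          have := pvRecs_eq_blk rest l0 []
          simpa using this
        rw [hsgo2, hrecs, List.all_map, List.all_map]
        apply pvAll_congr
        intro b hb
        obtain ⟨hbne, hbfree⟩ := pvBlk_nl_free rest [l0] (by simp)
          (by intro x hx; rw [List.mem_singleton] at hx; rw [hx]; exact hfree l0 (by simp))
          (fun x hx => hfree x (List.mem_cons_of_mem _ hx)) b hb
        match b, hbne with
        | b0 :: b', _ =>
          have hsplitb : PySem.Chars.splitOn (pvI (b0 :: b')) ['\n'] = b0 :: b' := by
            rw [pvSplitOn_eq_sgo '\n' [] _, pvSgo1_I (b0 :: b') (by simp) hbfree [] []]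
            simp
          simp only [Function.comp_apply, id_eq, hsplitb, pvChk]
          rw [show PySem.List.slice (b0 :: b') (some 1) none = (b0 :: b').drop 1 by simp [pysem]]
          rw [pvJoin_nil]
      · have hhd' : PySem.Chars.startswith l0 ['>'] = false := by
          cases hx : PySem.Chars.startswith l0 ['>']
          · rfl
          · exact absurd hx hhd
        rw [if_pos (by rw [hhd']; rfl), if_pos (by rw [hguard, hhd']; rfl)]
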